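-- pv_equiv track=rewrite | github.com/anonymouscontributor1577/LIMA | utils/global_planning.py | _build_cat
-- ===== SOURCE A (Python) =====
-- from collections import defaultdict, deque
--
-- def _build_cat(solution):
--     """Create a Conflict Avoidance Table (CAT) for Tie-Breaking"""
--     cat = defaultdict(int)  # Key: (position, time) / Value: count of agents at that position and time
--     if not solution:
--         return cat
--
--     max_len = max(len(path) for path in solution.values()) if solution else 0
--     for t in range(max_len):
--         for path in solution.values():
--             pos = path[t] if t < len(path) else path[-1]
--             cat[(pos, t)] += 1
--     return cat
-- ===== SOURCE B (Python) =====
-- from collections import defaultdict, deque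
--
-- def _build_cat(solution):
--     """Create a Conflict Avoidance Table (CAT) for Tie-Breaking"""
--     cat = defaultdict(int)
--     frontier = [[deque(path), None] for path in solution.values()]
--     t = 0
--     while any(tail for tail, _ in frontier):
--         for state in frontier:
--             if state[0]:
--                 state[1] = state[0].popleft()
--             cat[(state[1], t)] += 1
--         t += 1
--     return cat
-- ===== Notes on version B (the rewrite author's own statement) =====
-- stated objective: alternative
-- what changed: B never computes max_len and never indexes a path: it keeps a mutable frontier of (deque tail, last position) per agent and repeatedly pops heads while counting (last, t), terminating when every tail is exhausted, instead of A's time-major index sweep over range(max_len) with a per-element bounds-check branch.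
import Mathlib
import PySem

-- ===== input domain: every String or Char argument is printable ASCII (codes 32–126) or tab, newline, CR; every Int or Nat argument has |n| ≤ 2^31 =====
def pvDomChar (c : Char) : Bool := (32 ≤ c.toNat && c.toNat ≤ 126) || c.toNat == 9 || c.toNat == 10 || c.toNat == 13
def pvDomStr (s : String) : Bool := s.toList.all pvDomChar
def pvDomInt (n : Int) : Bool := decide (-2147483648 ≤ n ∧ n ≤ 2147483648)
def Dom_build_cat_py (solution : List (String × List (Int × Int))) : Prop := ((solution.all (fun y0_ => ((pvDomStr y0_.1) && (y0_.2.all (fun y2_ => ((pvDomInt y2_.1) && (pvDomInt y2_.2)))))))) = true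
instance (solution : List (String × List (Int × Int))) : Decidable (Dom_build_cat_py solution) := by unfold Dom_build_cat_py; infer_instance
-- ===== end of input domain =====

-- B replaces A's time-major index sweep over range(max_len) by a frontier of
-- (tail, last position) per agent, popping heads until every tail is exhausted;
-- it never computes max_len and never indexes a path.

-- ===== PORT A =====
-- time-major sweep: for t in range(max_len): for path in values: cat[(pos, t)] += 1
def build_cat_py (solution : List (String × List (Int × Int))) : List ((Int × Int) × Int × Int) :=
  let cat : PySem.Dict ((Int × Int) × Int) Int := PySem.Dict.empty
  if solution = [] then cat.items.map (fun p => (p.1.1, p.1.2, p.2))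
  else
    let vals := (PySem.Dict.ofList solution).values
    let max_len : Int :=
      if solution = [] then 0
      else (PySem.List.max? (vals.map PySem.List.len) (fun x => x)).getD 0  -- vals ≠ [] here, the default is unreachable
    let cat := (PySem.List.pyRange 0 max_len 1).foldl
      (fun cat t => vals.foldl
        (fun cat path =>
          let pos := if t < PySem.List.len path then PySem.List.pyGetD path t (0, 0)
                     else PySem.List.pyGetD path (-1) (0, 0)   -- path[-1]; raises on empty path — excluded by Pre_
          cat.modify (pos, t) 0 (· + 1)) cat)
      cat
    cat.items.map (fun p => (p.1.1, p.1.2, p.2))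

-- ===== PORT B =====
-- one while-iteration body ('for state in frontier: …'): a single pass that pops the head
-- of each nonempty tail (updating last) and counts (last, t); the pair fold carries the
-- rebuilt frontier (reversed, re-reversed at the end) alongside the dict.
def bcatStep (t : Int) (frontier : List (Option (Int × Int) × List (Int × Int)))
    (cat : PySem.Dict ((Int × Int) × Int) Int) :
    List (Option (Int × Int) × List (Int × Int)) × PySem.Dict ((Int × Int) × Int) Int :=
  let acc := frontier.foldl
    (fun (acc : List (Option (Int × Int) × List (Int × Int)) × PySem.Dict ((Int × Int) × Int) Int) s =>
      match s.2 with
      | [] => ((s.1, ([] : List (Int × Int))) :: acc.1, acc.2.modify (s.1.getD (0, 0), t) 0 (· + 1))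
        -- key is Python's `last`: it is None only on inputs outside Pre_, so the getD default is unreachable on Pre_
      | x :: xs => ((some x, xs) :: acc.1, acc.2.modify (x, t) 0 (· + 1)))
    (([] : List (Option (Int × Int) × List (Int × Int))), cat)
  (acc.1.reverse, acc.2)

-- the rebuilt frontier of one step (these three lemmas are cited by bcatLoop's decreasing_by)
lemma bcatStep_fst_aux (t : Int) (fr : List (Option (Int × Int) × List (Int × Int)))
    (a0 : List (Option (Int × Int) × List (Int × Int))) (c0 : PySem.Dict ((Int × Int) × Int) Int) :
    (fr.foldl
      (fun (acc : List (Option (Int × Int) × List (Int × Int)) × PySem.Dict ((Int × Int) × Int) Int) s =>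
        match s.2 with
        | [] => ((s.1, ([] : List (Int × Int))) :: acc.1, acc.2.modify (s.1.getD (0, 0), t) 0 (· + 1))
        | x :: xs => ((some x, xs) :: acc.1, acc.2.modify (x, t) 0 (· + 1)))
      (a0, c0)).1
    = (fr.map (fun s => match s.2 with
        | [] => (s.1, ([] : List (Int × Int)))
        | x :: xs => (some x, xs))).reverse ++ a0 := by
  induction fr generalizing a0 c0 with
  | nil => simp
  | cons s rest ih =>
    cases h : s.2 with
    | nil => simp [List.foldl_cons, h, ih]
    | cons x xs => simp [List.foldl_cons, h, ih]

lemma bcatStep_fst (t : Int) (fr : List (Option (Int × Int) × List (Int × Int)))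
    (cat : PySem.Dict ((Int × Int) × Int) Int) :
    (bcatStep t fr cat).1 = fr.map (fun s => match s.2 with
        | [] => (s.1, ([] : List (Int × Int)))
        | x :: xs => (some x, xs)) := by
  simp only [bcatStep]
  rw [bcatStep_fst_aux]
  simp

lemma stepF_sum_le (fr : List (Option (Int × Int) × List (Int × Int))) :
    ((fr.map (fun s => match s.2 with
        | [] => (s.1, ([] : List (Int × Int)))
        | x :: xs => (some x, xs))).map (fun s => s.2.length)).sum
      ≤ (fr.map (fun s => s.2.length)).sum := by
  induction fr with
  | nil => simp
  | cons s rest ih =>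
    cases hs : s.2 with
    | nil => simpa [hs] using ih
    | cons x xs =>
      simp only [List.map_cons, List.sum_cons, hs, List.length_cons]
      omega

lemma bcatStep_measure (t : Int) (fr : List (Option (Int × Int) × List (Int × Int)))
    (cat : PySem.Dict ((Int × Int) × Int) Int)
    (h : fr.any (fun s => !s.2.isEmpty) = true) :
    ((bcatStep t fr cat).1.map (fun s => s.2.length)).sum < (fr.map (fun s => s.2.length)).sum := by
  rw [bcatStep_fst]
  induction fr with
  | nil => simp at h
  | cons s rest ih =>
    simp only [List.any_cons, Bool.or_eq_true] at h
    cases hs : s.2 with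
    | nil =>
      have hrest : rest.any (fun s => !s.2.isEmpty) = true := by
        rcases h with h | h
        · rw [hs] at h; simp at h
        · exact h
      simpa [hs] using ih hrest
    | cons x xs =>
      have hle := stepF_sum_le rest
      simp only [List.map_cons, List.sum_cons, hs, List.length_cons]
      omega

-- while any(tail): one bcatStep, then t += 1
def bcatLoop (frontier : List (Option (Int × Int) × List (Int × Int))) (t : Int)
    (cat : PySem.Dict ((Int × Int) × Int) Int) : PySem.Dict ((Int × Int) × Int) Int :=
  if h : frontier.any (fun s => !s.2.isEmpty) = true then
    bcatLoop (bcatStep t frontier cat).1 (t + 1) (bcatStep t frontier cat).2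
  else cat
termination_by (frontier.map (fun s => s.2.length)).sum
decreasing_by exact bcatStep_measure t frontier cat h

def build_cat_py_alt (solution : List (String × List (Int × Int))) : List ((Int × Int) × Int × Int) :=
  let cat : PySem.Dict ((Int × Int) × Int) Int := PySem.Dict.empty
  let frontier := (PySem.Dict.ofList solution).values.map
    (fun p => ((none : Option (Int × Int)), p))
  let cat := bcatLoop frontier 0 cat
  cat.items.map (fun p => (p.1.1, p.1.2, p.2))

-- ===== PRECONDITION & SPEC =====
-- Pre_ excludes exactly the inputs on which A raises IndexError: a dict that mixes empty and
-- nonempty paths makes A evaluate path[-1] on an empty path.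
def Pre_build_cat_py (solution : List (String × List (Int × Int))) : Prop :=
  (∀ p ∈ (PySem.Dict.ofList solution).values, p ≠ []) ∨
  (∀ p ∈ (PySem.Dict.ofList solution).values, p = [])
instance (solution : List (String × List (Int × Int))) : Decidable (Pre_build_cat_py solution) := by unfold Pre_build_cat_py; infer_instance

def pvWitness_build_cat_py : (List (String × List (Int × Int))) := [("a", [(0, 0), (1, 0)]), ("b", [(2, 2)])]

def Spec_build_cat_py (solution : List (String × List (Int × Int))) (out : List ((Int × Int) × Int × Int)) : Prop := out = build_cat_py_alt solution
instance (solution : List (String × List (Int × Int))) (out : List ((Int × Int) × Int × Int)) : Decidable (Spec_build_cat_py solution out) := by unfold Spec_build_cat_py; infer_instance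

-- ===== CLAIM (what is proved, stated in full; the proofs are below) =====
def Claim_equal_build_cat_py : Prop := ∀ (solution : List (String × List (Int × Int))), Dom_build_cat_py solution → Pre_build_cat_py solution → Spec_build_cat_py solution (build_cat_py solution)

-- ===== LEMMAS AND PROOFS =====

-- position a path occupies at (padded) time t: p[t] for t < len p, else p[-1]
def padGet (p : List (Int × Int)) (t : Nat) : Int × Int := p.getD (min t (p.length - 1)) (0, 0)

-- the `last` cell of an agent's frontier entry after t loop iterations
def lastAt (t : Nat) (p : List (Int × Int)) : Option (Int × Int) :=
  if t = 0 then none else some (padGet p (t - 1))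

lemma padGet_of_lt (p : List (Int × Int)) (t : Nat) (h : t < p.length) :
    padGet p t = p.getD t (0, 0) := by
  unfold padGet
  rw [min_eq_left (by omega)]

lemma padGet_of_ge (p : List (Int × Int)) (hp : p ≠ []) (u t : Nat)
    (hu : p.length ≤ u + 1) (ht : p.length ≤ t + 1) : padGet p u = padGet p t := by
  unfold padGet
  have hl : 0 < p.length := List.length_pos_of_ne_nil hp
  rw [min_eq_right (by omega), min_eq_right (by omega)]

lemma padGet_of_ge' (p : List (Int × Int)) (hp : p ≠ []) (t : Nat) (h : p.length ≤ t) :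
    padGet p t = p.getLast hp := by
  unfold padGet
  have hl : 0 < p.length := List.length_pos_of_ne_nil hp
  rw [min_eq_right (by omega), List.getD_eq_getElem p _ (by omega), List.getLast_eq_getElem]

lemma bcatStep_snd_aux (t : Int) (fr : List (Option (Int × Int) × List (Int × Int)))
    (a0 : List (Option (Int × Int) × List (Int × Int))) (c0 : PySem.Dict ((Int × Int) × Int) Int) :
    (fr.foldl
      (fun (acc : List (Option (Int × Int) × List (Int × Int)) × PySem.Dict ((Int × Int) × Int) Int) s =>
        match s.2 with
        | [] => ((s.1, ([] : List (Int × Int))) :: acc.1, acc.2.modify (s.1.getD (0, 0), t) 0 (· + 1))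
        | x :: xs => ((some x, xs) :: acc.1, acc.2.modify (x, t) 0 (· + 1)))
      (a0, c0)).2
    = fr.foldl
        (fun cat s => cat.modify ((match s.2 with
          | [] => s.1.getD (0, 0)
          | x :: _ => x), t) 0 (· + 1)) c0 := by
  induction fr generalizing a0 c0 with
  | nil => simp
  | cons s rest ih =>
    cases h : s.2 with
    | nil => simp [List.foldl_cons, h, ih]
    | cons x xs => simp [List.foldl_cons, h, ih]

lemma bcatStep_snd (t : Int) (fr : List (Option (Int × Int) × List (Int × Int)))
    (cat : PySem.Dict ((Int × Int) × Int) Int) :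
    (bcatStep t fr cat).2 = fr.foldl
        (fun cat s => cat.modify ((match s.2 with
          | [] => s.1.getD (0, 0)
          | x :: _ => x), t) 0 (· + 1)) cat := by
  simp only [bcatStep]
  rw [bcatStep_snd_aux]

lemma values_ofList_ne_nil (l : List (String × List (Int × Int))) (h : l ≠ []) :
    (PySem.Dict.ofList l).values ≠ [] := by
  cases l with
  | nil => exact absurd rfl h
  | cons x rest =>
    have hk : (PySem.Dict.ofList (x :: rest)).keys ≠ [] := by
      have hfold := PySem.Dict.keys_foldl_insert_key (κ := String) (ν := List (Int × Int))
        (x :: rest) Prod.fst (fun _ p => p.2) PySem.Dict.empty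
      have hm : x.1 ∈ (PySem.Dict.ofList (x :: rest)).keys := by
        show x.1 ∈ (List.foldl (fun acc p => acc.insert p.1 p.2) PySem.Dict.empty (x :: rest)).keys
        rw [hfold]
        simp [PySem.Dict.keys_empty]
      intro hnil; rw [hnil] at hm; exact absurd hm (List.not_mem_nil)
    intro hv
    apply hk
    have hlen : (PySem.Dict.ofList (x :: rest)).keys.length = (PySem.Dict.ofList (x :: rest)).values.length := by
      simp [PySem.Dict.keys, PySem.Dict.values]
    rw [hv] at hlen
    exact List.eq_nil_of_length_eq_zero hlen

-- main invariant: the while loop from the state after t iterations equals A's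
-- remaining time-major sweep over range' t k (with t + k = the exact max length)
lemma bcatLoop_inv (vals : List (List (Int × Int))) (hne : ∀ p ∈ vals, p ≠ [])
    (n : Nat) (hub : ∀ p ∈ vals, p.length ≤ n)
    (q : List (Int × Int)) (hq : q ∈ vals) (hqn : q.length = n) :
    ∀ (k t : Nat), t + k = n → ∀ cat,
    bcatLoop (vals.map (fun p => (lastAt t p, p.drop t))) (t : Int) cat
      = (List.range' t k).foldl
          (fun cat u => vals.foldl
            (fun cat p => cat.modify (padGet p u, (u : Int)) 0 (· + 1)) cat) cat := by
  intro k
  induction k with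
  | zero =>
    intro t htk cat
    rw [bcatLoop, dif_neg]
    · simp
    · simp only [List.any_map, List.any_eq_true, not_exists, not_and, Function.comp]
      intro p hp
      have hdz : p.drop t = [] := List.drop_eq_nil_of_le (by have := hub p hp; omega)
      simp [hdz]
  | succ k ih =>
    intro t htk cat
    have ht : t < n := by omega
    have hcond : ((vals.map (fun p => (lastAt t p, p.drop t))).any (fun s => !s.2.isEmpty)) = true := by
      simp only [List.any_map, List.any_eq_true, Function.comp]
      refine ⟨q, hq, ?_⟩
      simp [List.drop_eq_nil_iff, hqn]
      omega
    rw [bcatLoop, dif_pos hcond]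
    have hfront : (bcatStep (t : Int) (vals.map (fun p => (lastAt t p, p.drop t))) cat).1
        = vals.map (fun p => (lastAt (t + 1) p, p.drop (t + 1))) := by
      rw [bcatStep_fst, List.map_map]
      apply List.map_congr_left
      intro p hp
      simp only [Function.comp]
      cases hd : p.drop t with
      | nil =>
        have hlen : p.length ≤ t := by
          by_contra hc
          exact absurd hd (by simp [List.drop_eq_nil_iff]; omega)
        have h0 : 0 < p.length := List.length_pos_of_ne_nil (hne p hp)
        have hdd : p.drop (t + 1) = [] := List.drop_eq_nil_of_le (by omega)
        have ht0 : t ≠ 0 := by omega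
        simp only [hdd, lastAt, if_neg ht0, if_neg (Nat.succ_ne_zero t), Nat.add_sub_cancel]
        rw [padGet_of_ge p (hne p hp) (t - 1) t (by omega) (by omega)]
      | cons x xs =>
        have hne' : p.drop t ≠ [] := by rw [hd]; exact List.cons_ne_nil x xs
        have hlt : t < p.length := by
          by_contra hc
          exact hne' (List.drop_eq_nil_of_le (by omega))
        have hget : p.drop t = p[t] :: p.drop (t + 1) := List.drop_eq_getElem_cons hlt
        rw [hget] at hd
        injection hd with h1 h2
        rw [← h2, ← h1]
        have ht1 : t + 1 ≠ 0 := Nat.succ_ne_zero t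
        simp only [lastAt, if_neg ht1, Nat.add_sub_cancel]
        rw [padGet_of_lt p t hlt, List.getD_eq_getElem p (0, 0) hlt]
    have hcat : (bcatStep (t : Int) (vals.map (fun p => (lastAt t p, p.drop t))) cat).2
        = vals.foldl (fun cat p => cat.modify (padGet p t, (t : Int)) 0 (· + 1)) cat := by
      rw [bcatStep_snd, List.foldl_map]
      apply PySem.List.foldl_congr_mem
      intro acc p hp
      cases hd : p.drop t with
      | nil =>
        have hlen : p.length ≤ t := by
          by_contra hc
          exact absurd hd (by simp [List.drop_eq_nil_iff]; omega)
        have h0 : 0 < p.length := List.length_pos_of_ne_nil (hne p hp)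
        have ht0 : t ≠ 0 := by omega
        simp only [lastAt, if_neg ht0, Option.getD_some]
        rw [padGet_of_ge p (hne p hp) (t - 1) t (by omega) (by omega)]
      | cons x xs =>
        have hne' : p.drop t ≠ [] := by rw [hd]; exact List.cons_ne_nil x xs
        have hlt : t < p.length := by
          by_contra hc
          exact hne' (List.drop_eq_nil_of_le (by omega))
        have hget : p.drop t = p[t] :: p.drop (t + 1) := List.drop_eq_getElem_cons hlt
        rw [hget] at hd
        injection hd with h1 h2
        rw [← h1]
        rw [padGet_of_lt p t hlt, List.getD_eq_getElem p (0, 0) hlt]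
    rw [hfront, hcat]
    have hcast : ((t : Int) + 1) = ((t + 1 : Nat) : Int) := by push_cast; ring
    rw [hcast, ih (t + 1) (by omega)]
    rw [List.range'_succ]
    simp

-- ===== VERDICT (by name: the statement is the Claim_ definition above) =====
theorem build_cat_py_spec : Claim_equal_build_cat_py := by
  intro solution _hdom hpre
  unfold Spec_build_cat_py
  by_cases hsol : solution = []
  · subst hsol
    simp only [build_cat_py, build_cat_py_alt]
    rw [show (PySem.Dict.ofList ([] : List (String × List (Int × Int)))).values = [] from rfl]
    rw [List.map_nil, bcatLoop, dif_neg (by simp)]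
    simp
  · have hvne := values_ofList_ne_nil solution hsol
    unfold Pre_build_cat_py at hpre
    simp only [build_cat_py, build_cat_py_alt, if_neg hsol]
    set vals := (PySem.Dict.ofList solution).values with hvals
    obtain ⟨m, hm⟩ : ∃ m, PySem.List.max? (vals.map PySem.List.len) (fun x => x) = some m := by
      cases hmx : PySem.List.max? (vals.map PySem.List.len) (fun x => x) with
      | none =>
        rw [PySem.List.max?_eq_none_iff] at hmx
        exact absurd (List.map_eq_nil_iff.mp hmx) hvne
      | some m => exact ⟨m, rfl⟩
    obtain ⟨q, hq, hqm⟩ := List.mem_map.mp (PySem.List.max?_mem hm)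
    have hm_nonneg : 0 ≤ m := by rw [← hqm]; simp [PySem.List.len_eq]
    have hmax := PySem.List.max?_isMax hm
    set n := m.toNat with hn
    have hmn : m = (n : Int) := by omega
    have hqn : q.length = n := by
      simp only [PySem.List.len_eq] at hqm
      omega
    have hlen_le : ∀ p ∈ vals, p.length ≤ n := by
      intro p hp
      have := hmax _ (List.mem_map_of_mem hp)
      simp only [PySem.List.len_eq] at this
      simp only [PySem.List.len_eq] at hqm
      omega
    rw [hm, Option.getD_some, hmn]
    rcases hpre with hnem | hemp
    · -- every path nonempty: the main case
      have hfr : (vals.map (fun p => ((none : Option (Int × Int)), p)))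
          = vals.map (fun p => (lastAt 0 p, p.drop 0)) := by
        apply List.map_congr_left
        intro p hp
        simp [lastAt]
      have hinv := bcatLoop_inv vals hnem n hlen_le q hq hqn n 0 (by omega) PySem.Dict.empty
      rw [Nat.cast_zero] at hinv
      rw [hfr, hinv]
      rw [PySem.List.pyRange_one]
      simp only [Int.sub_zero, Int.toNat_natCast, zero_add]
      rw [List.range_eq_range', List.foldl_map]
      suffices hdd : (List.range' 0 n).foldl
          (fun cat (u : Nat) => vals.foldl
            (fun cat path =>
              let pos := if (u : Int) < PySem.List.len path then PySem.List.pyGetD path (u : Int) (0, 0)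
                         else PySem.List.pyGetD path (-1) (0, 0)
              cat.modify (pos, (u : Int)) 0 (· + 1)) cat) (PySem.Dict.empty : PySem.Dict ((Int × Int) × Int) Int)
          = (List.range' 0 n).foldl
              (fun cat u => vals.foldl
                (fun cat p => cat.modify (padGet p u, (u : Int)) 0 (· + 1)) cat) (PySem.Dict.empty : PySem.Dict ((Int × Int) × Int) Int) by
        rw [← hdd]
      apply PySem.List.foldl_congr_mem
      intro cat' u _
      apply PySem.List.foldl_congr_mem
      intro acc p hp
      have hp' := hnem p hp
      simp only []
      by_cases hu2 : (u : Int) < PySem.List.len p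
      · have hun : u < p.length := by
          simp only [PySem.List.len_eq] at hu2
          exact_mod_cast hu2
        rw [if_pos hu2, PySem.List.pyGetD_natCast, padGet_of_lt p u hun]
      · have hun : p.length ≤ u := by
          simp only [PySem.List.len_eq, not_lt] at hu2
          exact_mod_cast hu2
        rw [if_neg hu2, PySem.List.pyGetD_neg_one p (0, 0) hp', padGet_of_ge' p hp' u hun]
    · -- every path empty: max length is 0, both loops perform no iteration
      have hn0 : n = 0 := by
        rw [hemp q hq] at hqn
        simp at hqn
        omega
      rw [hn0]
      simp only [Nat.cast_zero]
      rw [PySem.List.pyRange_one_eq_nil (le_refl 0)]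
      simp only [List.foldl_nil]
      rw [bcatLoop, dif_neg]
      · simp only [List.any_map, List.any_eq_true, Function.comp, not_exists, not_and,
          Bool.not_eq_true]
        intro p hp
        rw [hemp p hp]
        rfl
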